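-- pv_equiv track=rewrite | github.com/MSebeke/Master | CreatingHairpinMotifs.py | CheckBPContinuityTLoops1
-- ===== SOURCE A (Python) =====
-- def CheckBPContinuityTLoops1(x):
--     DiffList=[]
--     Checklist=[1,1,1,1,1,2]
--     for i in range(len(x)-1):
--         Base_Position=int(x[i])
--         Next_Base=int(x[i+1])
--         Diff = Next_Base - Base_Position
--         DiffList.append(Diff)
--     Comparison = [i for i,j in zip(Checklist,DiffList) if i == j]
--     if len(Comparison) == len(Checklist):
--         return True
--     else:
--         return False
-- ===== SOURCE B (Python) =====
-- def CheckBPContinuityTLoops1(x):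
--     vals = [int(e) for e in x]
--     if len(vals) < 7:
--         return False
--     base = vals[0]
--     return vals[:7] == [base + d for d in (0, 1, 2, 3, 4, 5, 7)]
-- ===== Notes on version B (the rewrite author's own statement) =====
-- stated objective: simpler
-- what changed: Replaces A's pairwise-difference list, zip-against-checklist comprehension and length comparison with a direct closed-form check: the first seven values must equal [base, base+1, ..., base+5, base+7] relative to the first element.
import Mathlib
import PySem

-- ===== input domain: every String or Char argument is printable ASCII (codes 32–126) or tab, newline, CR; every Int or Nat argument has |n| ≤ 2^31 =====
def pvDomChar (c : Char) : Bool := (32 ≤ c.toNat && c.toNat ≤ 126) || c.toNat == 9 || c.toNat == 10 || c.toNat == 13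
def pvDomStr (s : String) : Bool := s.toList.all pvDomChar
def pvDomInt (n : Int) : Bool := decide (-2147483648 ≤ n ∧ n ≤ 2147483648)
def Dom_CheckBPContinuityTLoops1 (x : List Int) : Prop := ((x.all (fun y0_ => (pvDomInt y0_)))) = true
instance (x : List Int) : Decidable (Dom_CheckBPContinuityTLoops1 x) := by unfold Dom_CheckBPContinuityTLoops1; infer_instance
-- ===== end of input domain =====

-- B replaces A's pairwise-difference list + zip-against-checklist with a direct
-- closed-form comparison of the first seven values against [base, base+1, …, base+5, base+7] (simpler).


-- ===== PORT A =====
def CheckBPContinuityTLoops1 (x : List Int) : Bool :=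
  let Checklist : List Int := [1, 1, 1, 1, 1, 2]
  -- for i in range(len(x)-1): DiffList.append(int(x[i+1]) - int(x[i]))
  -- (indices i, i+1 are always in range inside this loop, so pyGetD's default is never used)
  let DiffList : List Int :=
    (PySem.List.pyRange 0 ((x.length : Int) - 1) 1).foldl
      (fun acc i =>
        let basePos := PySem.List.pyGetD x i 0
        let nextBase := PySem.List.pyGetD x (i + 1) 0
        acc ++ [nextBase - basePos]) []
  let Comparison : List Int :=
    (Checklist.zip DiffList).foldl
      (fun acc p => if p.1 == p.2 then acc ++ [p.1] else acc) []
  if Comparison.length == Checklist.length then true else false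

-- ===== PORT B =====
def CheckBPContinuityTLoops1_alt (x : List Int) : Bool :=
  let vals : List Int := x
  if vals.length < 7 then false
  else
    let base := PySem.List.pyGetD vals 0 0
    PySem.List.slice vals (some 0) (some 7)
      == ([0, 1, 2, 3, 4, 5, 7] : List Int).map (fun d => base + d)

-- ===== PRECONDITION & SPEC =====
def Spec_CheckBPContinuityTLoops1 (x : List Int) (out : Bool) : Prop := out = CheckBPContinuityTLoops1_alt x
instance (x : List Int) (out : Bool) : Decidable (Spec_CheckBPContinuityTLoops1 x out) := by unfold Spec_CheckBPContinuityTLoops1; infer_instance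

-- ===== CLAIM (what is proved, stated in full; the proofs are below) =====
def Claim_equal_CheckBPContinuityTLoops1 : Prop := ∀ (x : List Int), Dom_CheckBPContinuityTLoops1 x → Spec_CheckBPContinuityTLoops1 x (CheckBPContinuityTLoops1 x)

-- ===== LEMMAS AND PROOFS =====

-- A returns False whenever fewer than 7 elements are given: the zipped comparison
-- list is then strictly shorter than the 6-element checklist.
theorem shortA (x : List Int) (h : x.length < 7) : CheckBPContinuityTLoops1 x = false := by
  unfold CheckBPContinuityTLoops1
  simp only [PySem.List.foldl_append_singleton_eq_map, PySem.List.foldl_append_if,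
    List.nil_append]
  have hlen : (([1, 1, 1, 1, 1, 2] : List Int).zip
      ((PySem.List.pyRange 0 ((x.length : Int) - 1) 1).map
        (fun i => PySem.List.pyGetD x (i + 1) 0 - PySem.List.pyGetD x i 0))).length < 6 := by
    rw [List.length_zip, List.length_map, PySem.List.length_pyRange_one]
    simp only [List.length_cons, List.length_nil]
    omega
  have hfil := List.length_filter_le
    (fun p : Int × Int => p.1 == p.2)
    (([1, 1, 1, 1, 1, 2] : List Int).zip
      ((PySem.List.pyRange 0 ((x.length : Int) - 1) 1).map
        (fun i => PySem.List.pyGetD x (i + 1) 0 - PySem.List.pyGetD x i 0)))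
  simp only [List.length_map]
  rw [if_neg]
  simp only [beq_iff_eq, List.length_cons, List.length_nil]
  omega

theorem longA (a b c d e f g : Int) (rest : List Int) :
    CheckBPContinuityTLoops1 (a :: b :: c :: d :: e :: f :: g :: rest)
      = CheckBPContinuityTLoops1_alt (a :: b :: c :: d :: e :: f :: g :: rest) := by
  unfold CheckBPContinuityTLoops1 CheckBPContinuityTLoops1_alt
  simp only [PySem.List.foldl_append_singleton_eq_map, PySem.List.foldl_append_if,
    List.nil_append]
  have hsplit : PySem.List.pyRange 0 (((a :: b :: c :: d :: e :: f :: g :: rest).length : Int) - 1) 1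
      = PySem.List.pyRange 0 6 1 ++ PySem.List.pyRange 6 (((a :: b :: c :: d :: e :: f :: g :: rest).length : Int) - 1) 1 := by
    apply PySem.List.pyRange_one_append
    · norm_num
    · simp only [List.length_cons]
      push_cast
      omega
  rw [hsplit, List.map_append]
  have h6 : PySem.List.pyRange 0 6 1 = [0, 1, 2, 3, 4, 5] := by decide
  rw [h6]
  have hdiff : ([0, 1, 2, 3, 4, 5] : List Int).map
      (fun i => PySem.List.pyGetD (a :: b :: c :: d :: e :: f :: g :: rest) (i + 1) 0
        - PySem.List.pyGetD (a :: b :: c :: d :: e :: f :: g :: rest) i 0)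
      = [b - a, c - b, d - c, e - d, f - e, g - f] := by
    norm_num [PySem.List.pyGetD_ofNat']
  rw [hdiff]
  rw [show ([1, 1, 1, 1, 1, 2] : List Int) = [1, 1, 1, 1, 1, 2] ++ ([] : List Int) from rfl]
  rw [List.zip_append (by simp), List.zip_nil_left, List.append_nil]
  have hslice : PySem.List.slice (a :: b :: c :: d :: e :: f :: g :: rest) (some 0) (some 7)
      = [a, b, c, d, e, f, g] := by
    simp [PySem.List.slice_to]
  rw [hslice]
  simp only [List.zip_cons_cons, List.zip_nil_left]
  rw [if_neg (show ¬((a :: b :: c :: d :: e :: f :: g :: rest).length < 7) by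
    simp only [List.length_cons]; omega)]
  have hiff : ((List.filter (fun x : Int × Int => x.1 == x.2)
      [(1, b - a), (1, c - b), (1, d - c), (1, e - d), (1, f - e), (2, g - f)]).length = 6)
      ↔ (b = a + 1 ∧ c = a + 2 ∧ d = a + 3 ∧ e = a + 4 ∧ f = a + 5 ∧ g = a + 7) := by
    rw [show (6 : Nat) = ([(1, b - a), (1, c - b), (1, d - c), (1, e - d), (1, f - e),
        (2, g - f)] : List (Int × Int)).length from rfl,
      List.length_filter_eq_length_iff]
    simp only [List.mem_cons, List.not_mem_nil, or_false, forall_eq_or_imp, forall_eq,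
      beq_iff_eq]
    constructor <;> intro h <;> omega
  simp only [List.length_map, List.append_nil, List.length_cons, List.length_nil,
    beq_iff_eq, List.map_cons, List.map_nil, PySem.List.pyGetD_zero_cons]
  by_cases hall : b = a + 1 ∧ c = a + 2 ∧ d = a + 3 ∧ e = a + 4 ∧ f = a + 5 ∧ g = a + 7
  · rw [if_pos (hiff.mpr hall)]
    symm
    simp only [beq_iff_eq, List.cons.injEq, and_true]
    omega
  · rw [if_neg (fun h => hall (hiff.mp h))]
    symm
    rw [beq_eq_false_iff_ne]
    intro heq
    simp only [List.cons.injEq, and_true] at heq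
    exact hall (by omega)

-- ===== VERDICT (by name: the statement is the Claim_ definition above) =====
theorem CheckBPContinuityTLoops1_spec : Claim_equal_CheckBPContinuityTLoops1 := by
  intro x _
  unfold Spec_CheckBPContinuityTLoops1
  by_cases h : x.length < 7
  · rw [shortA x h]
    unfold CheckBPContinuityTLoops1_alt
    rw [if_pos h]
  · rcases x with _ | ⟨a, _ | ⟨b, _ | ⟨c, _ | ⟨d, _ | ⟨e, _ | ⟨f, _ | ⟨g, rest⟩⟩⟩⟩⟩⟩⟩ <;>
      first
        | (exfalso; simp only [List.length_cons, List.length_nil] at h; omega)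
        | exact longA a b c d e f g rest
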